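-- pv_equiv track=rewrite | github.com/jmoik/bitcoin | contrib/devtools/check_quotes.py | find_quote_parts
-- ===== SOURCE A (Python) =====
-- from typing import Dict, List, Tuple, Optional
--
-- def find_quote_parts(textparts: List[str],
--                      sectiontext: str,
--                      offset: int) -> Optional[int]:
--     """Returns offsets within sectiontext where each part starts"""
--     offsets = []
--     for part in textparts:
--         while True:
--             offset = sectiontext.find(textparts[0], offset)
--             if offset == -1:
--                 return []
--
--             offsets.append(offset)
--             # All done if this is the last.
--             if len(textparts) == 1:
--                 return offsets
--
--             # Search for the rest.
--             res = find_quote_parts(textparts[1:], sectiontext, offset + len(textparts[0]))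
--             if res != []:
--                 return offsets + res
--
--             # Ensure progress!
--             offset += 1
--
--     return []
-- ===== SOURCE B (Python) =====
-- from typing import List, Optional
--
-- def find_quote_parts(textparts: List[str],
--                      sectiontext: str,
--                      offset: int) -> Optional[int]:
--     """Returns offsets within sectiontext where each part starts"""
--     offsets = []
--     for part in textparts:
--         offset = sectiontext.find(part, offset)
--         if offset == -1:
--             return []
--         offsets.append(offset)
--         offset += len(part)
--     return offsets
-- ===== Notes on version B (the rewrite author's own statement) =====
-- stated objective: simpler
-- what changed: Replaced A's recursive backtracking search (recurse on the tail, and on failure retry the head match one position later) by a single greedy left-to-right pass that finds each part at its earliest position after the previous part's end; leftmost matching makes backtracking useless, so the values agree.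
import Mathlib
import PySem

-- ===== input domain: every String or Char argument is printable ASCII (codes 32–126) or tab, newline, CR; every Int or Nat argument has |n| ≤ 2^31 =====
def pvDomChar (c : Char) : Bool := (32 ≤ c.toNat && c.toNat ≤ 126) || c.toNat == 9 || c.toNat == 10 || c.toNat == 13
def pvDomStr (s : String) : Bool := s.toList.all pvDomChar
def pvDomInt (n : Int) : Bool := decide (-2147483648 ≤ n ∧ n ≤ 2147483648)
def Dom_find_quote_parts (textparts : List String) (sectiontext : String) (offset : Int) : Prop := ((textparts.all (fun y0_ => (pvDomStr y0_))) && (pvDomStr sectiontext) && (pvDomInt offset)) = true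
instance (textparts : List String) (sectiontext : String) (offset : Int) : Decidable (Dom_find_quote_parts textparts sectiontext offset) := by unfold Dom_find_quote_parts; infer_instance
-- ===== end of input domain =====

-- B replaces A's recursive backtracking by one greedy left-to-right pass (leftmost matching
-- makes backtracking useless); the return values are proved identical on all inputs.

-- bounds of a successful s.find(sub, start): needed by Port A's termination (cited in decreasing_by)
theorem pvFindFrom_bounds (s sub : List Char) (o : Int)
    (h : PySem.Chars.findFrom s sub o none ≠ -1) :
    o ≤ PySem.Chars.findFrom s sub o none ∧ 0 ≤ PySem.Chars.findFrom s sub o none ∧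
      PySem.Chars.findFrom s sub o none ≤ (s.length : Int) := by
  simp only [PySem.Chars.findFrom] at *
  set n : Int := (s.length : Int) with hn
  set st : Int := if o < 0 then if o + n < 0 then 0 else o + n else o with hst
  have hst0 : 0 ≤ st ∧ o ≤ st := by
    rw [hst]; split_ifs <;> constructor <;> omega
  by_cases hlt : n < st
  · simp [hlt] at h
  · simp only [hlt, if_false] at h ⊢
    set r : Int := PySem.Chars.find (List.drop st.toNat (List.take n.toNat s)) sub with hr
    by_cases hr1 : r = -1
    · simp [hr1] at h
    · simp only [hr1, if_false]
      have hrge : -1 ≤ r := PySem.Chars.neg_one_le_find _ _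
      have hrle : r ≤ ((List.drop st.toNat (List.take n.toNat s)).length : Int) :=
        PySem.Chars.find_le_length _ _
      have hdl : ((List.drop st.toNat (List.take n.toNat s)).length : Int) = n - st := by
        simp [List.length_drop, hn]; omega
      rw [hdl] at hrle
      refine ⟨by omega, by omega, by omega⟩

-- ===== PORT A =====
-- A's for-loop body always returns inside its first iteration, so it only tests textparts ≠ [];
-- the while-loop (find, append, recurse on the tail, on failure advance offset by one) is
-- find_quote_parts_go; acc carries the accumulated `offsets` list.
def find_quote_parts_go (p : String) (rest : List String) (s : String) (off : Int) (acc : List Int) : List Int :=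
  let f := PySem.Str.findFrom s p off
  if _hf : f = -1 then []
  else
    let acc' := acc ++ [f]
    match rest with
    | [] => acc'            -- len(textparts) == 1
    | q :: rest' =>
      let res := find_quote_parts_go q rest' s (f + PySem.Str.len p) []   -- find_quote_parts(textparts[1:], sectiontext, offset + len(textparts[0]))
      if res ≠ [] then acc' ++ res
      else find_quote_parts_go p (q :: rest') s (f + 1) acc'              -- offset += 1, next while iteration
termination_by (rest.length, (((s.toList.length : Int) + 1) - off).toNat)
decreasing_by
  · exact Prod.Lex.left _ _ (by simp)
  · apply Prod.Lex.right
    have hb := pvFindFrom_bounds s.toList p.toList off (by simpa using _hf)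
    simp only [PySem.Str.findFrom_eq] at *
    omega

def find_quote_parts (textparts : List String) (sectiontext : String) (offset : Int) : List Int :=
  match textparts with
  | [] => []
  | p :: rest => find_quote_parts_go p rest sectiontext offset []

-- ===== PORT B =====
-- greedy single pass: find each part at the earliest position at or after the previous end
def find_quote_parts_alt_go (tp : List String) (s : String) (off : Int) (acc : List Int) : List Int :=
  match tp with
  | [] => acc
  | p :: rest =>
    let f := PySem.Str.findFrom s p off
    if f = -1 then []
    else find_quote_parts_alt_go rest s (f + PySem.Str.len p) (acc ++ [f])

def find_quote_parts_alt (textparts : List String) (sectiontext : String) (offset : Int) : List Int :=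
  find_quote_parts_alt_go textparts sectiontext offset []

-- ===== PRECONDITION & SPEC =====
def Spec_find_quote_parts (textparts : List String) (sectiontext : String) (offset : Int) (out : List Int) : Prop := out = find_quote_parts_alt textparts sectiontext offset
instance (textparts : List String) (sectiontext : String) (offset : Int) (out : List Int) : Decidable (Spec_find_quote_parts textparts sectiontext offset out) := by unfold Spec_find_quote_parts; infer_instance

-- ===== CLAIM (what is proved, stated in full; the proofs are below) =====
def Claim_equal_find_quote_parts : Prop := ∀ (textparts : List String) (sectiontext : String) (offset : Int), Dom_find_quote_parts textparts sectiontext offset → Spec_find_quote_parts textparts sectiontext offset (find_quote_parts textparts sectiontext offset)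

-- ===== LEMMAS AND PROOFS =====

-- monotonicity of a successful find in its start position, for nonnegative starts
theorem pvFindFrom_mono (s sub : List Char) (o o' : Int) (h0 : 0 ≤ o) (hle : o ≤ o')
    (h' : PySem.Chars.findFrom s sub o' none ≠ -1) :
    PySem.Chars.findFrom s sub o none ≠ -1 ∧
      PySem.Chars.findFrom s sub o none ≤ PySem.Chars.findFrom s sub o' none := by
  simp only [PySem.Chars.findFrom] at *
  set n : Int := (s.length : Int) with hn
  have hnn : n.toNat = s.length := by omega
  rw [hnn, List.take_length] at h' ⊢
  have ho : ¬ o < 0 := by omega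
  have ho' : ¬ o' < 0 := by omega
  simp only [ho, ho', if_false] at h' ⊢
  by_cases hb' : n < o'
  · simp [hb'] at h'
  · have hb : ¬ n < o := by omega
    simp only [hb, hb', if_false] at h' ⊢
    set r' : Int := PySem.Chars.find (List.drop o'.toNat s) sub with hr'
    by_cases hr'1 : r' = -1
    · simp [hr'1] at h'
    · simp only [hr'1, if_false] at h' ⊢
      -- success at o' gives infix of drop o'.toNat s, hence of drop o.toNat s
      have hinf' : sub <:+: List.drop o'.toNat s := (PySem.Chars.find_ne_neg_one_iff _ _).mp hr'1
      have hdd : List.drop (o'.toNat - o.toNat) (List.drop o.toNat s) = List.drop o'.toNat s := by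
        rw [List.drop_drop]; congr 1; omega
      have hsuf : List.drop o'.toNat s <:+ List.drop o.toNat s := by
        rw [← hdd]; exact List.drop_suffix _ _
      have hinf : sub <:+: List.drop o.toNat s := hinf'.trans hsuf.isInfix
      set r : Int := PySem.Chars.find (List.drop o.toNat s) sub with hr
      have hr1 : r ≠ -1 := (PySem.Chars.find_ne_neg_one_iff _ _).mpr hinf
      simp only [hr1, if_false]
      have hrn : -1 ≤ r := PySem.Chars.neg_one_le_find _ _
      have hrn' : -1 ≤ r' := PySem.Chars.neg_one_le_find _ _
      refine ⟨by omega, ?_⟩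
      have hs := PySem.Chars.find_spec (s := List.drop o.toNat s) (sub := sub) (by omega)
      have hs' := PySem.Chars.find_spec (s := List.drop o'.toNat s) (sub := sub) (by omega)
      rw [← hr] at hs; rw [← hr'] at hs'
      by_contra hgt
      have hgt' : o' + r' < o + r := by omega
      clear hgt
      have hpre : sub <+: List.drop (o.toNat + (o'.toNat + r'.toNat - o.toNat)) s := by
        have : o.toNat + (o'.toNat + r'.toNat - o.toNat) = o'.toNat + r'.toNat := by omega
        rw [this, ← List.drop_drop]
        exact hs'.1
      have hlt : o'.toNat + r'.toNat - o.toNat < r.toNat := by omega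
      have := hs.2 _ hlt
      rw [List.drop_drop] at this
      exact this hpre

-- the accumulator of B's pass only prefixes a successful result
theorem pvAltGo_acc (tp : List String) (s : String) (o : Int) (a : List Int) (h : tp ≠ []) :
    find_quote_parts_alt_go tp s o a =
      if find_quote_parts_alt_go tp s o [] = [] then []
      else a ++ find_quote_parts_alt_go tp s o [] := by
  induction tp generalizing o a with
  | nil => exact absurd rfl h
  | cons p rest ih =>
    simp only [find_quote_parts_alt_go, PySem.Str.findFrom_eq, PySem.Str.len_eq]
    by_cases hf : PySem.Chars.findFrom s.toList p.toList o none = -1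
    · simp [hf]
    · simp only [hf, if_false, List.nil_append]
      cases rest with
      | nil => simp [find_quote_parts_alt_go]
      | cons q rest' =>
        rw [ih _ (a ++ [PySem.Chars.findFrom s.toList p.toList o none]) (by simp),
            ih _ ([PySem.Chars.findFrom s.toList p.toList o none]) (by simp)]
        by_cases hX : find_quote_parts_alt_go (q :: rest') s
            (PySem.Chars.findFrom s.toList p.toList o none + (p.length : Int)) [] = []
        · simp [hX]
        · simp [hX, List.append_assoc]

-- failure of B's pass is monotone in the start offset
theorem pvAltGo_mono (tp : List String) (s : String) (o o' : Int) (h0 : 0 ≤ o) (hle : o ≤ o')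
    (h : find_quote_parts_alt_go tp s o [] = []) : find_quote_parts_alt_go tp s o' [] = [] := by
  induction tp generalizing o o' with
  | nil => rfl
  | cons p rest ih =>
    simp only [find_quote_parts_alt_go, PySem.Str.findFrom_eq, PySem.Str.len_eq] at h ⊢
    by_cases hf' : PySem.Chars.findFrom s.toList p.toList o' none = -1
    · simp [hf']
    · obtain ⟨hf, hff'⟩ := pvFindFrom_mono s.toList p.toList o o' h0 hle hf'
      simp only [hf, hf', if_false, List.nil_append] at h ⊢
      cases rest with
      | nil => simp [find_quote_parts_alt_go] at h
      | cons q rest' =>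
        have hfb := pvFindFrom_bounds s.toList p.toList o hf
        rw [pvAltGo_acc _ _ _ _ (by simp)] at h
        rw [pvAltGo_acc _ _ _ _ (by simp)]
        by_cases hX : find_quote_parts_alt_go (q :: rest') s
            (PySem.Chars.findFrom s.toList p.toList o none + (p.length : Int)) [] = []
        · have := ih _ _ (by omega)
            (show PySem.Chars.findFrom s.toList p.toList o none + (p.length : Int) ≤
              PySem.Chars.findFrom s.toList p.toList o' none + (p.length : Int) by omega) hX
          simp [this]
        · simp [hX] at h

-- the key simulation: A's backtracking loop computes exactly B's greedy pass
theorem pvGo_eq (p : String) (rest : List String) (s : String) (off : Int) (acc : List Int) :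
    find_quote_parts_go p rest s off acc = find_quote_parts_alt_go (p :: rest) s off acc := by
  fun_induction find_quote_parts_go p rest s off acc with
  | case1 p rest off acc f h =>
    simp only [f, PySem.Str.findFrom_eq] at h
    simp [find_quote_parts_alt_go, h]
  | case2 p off acc f h acc' =>
    simp only [f, PySem.Str.findFrom_eq] at h
    simp [find_quote_parts_alt_go, acc', f, h]
  | case3 p off acc f h acc' q rest' res hres ih1 =>
    have h' : ¬ PySem.Str.findFrom s p off = -1 := h
    have hX : find_quote_parts_alt_go (q :: rest') s (PySem.Str.findFrom s p off + PySem.Str.len p) [] ≠ [] := by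
      rw [← ih1]; exact hres
    rw [show find_quote_parts_alt_go (p :: q :: rest') s off acc =
          if PySem.Str.findFrom s p off = -1 then []
          else find_quote_parts_alt_go (q :: rest') s
            (PySem.Str.findFrom s p off + PySem.Str.len p)
            (acc ++ [PySem.Str.findFrom s p off]) from rfl]
    rw [if_neg h', pvAltGo_acc _ _ _ _ (List.cons_ne_nil _ _), if_neg hX, ← ih1]
  | case4 p off acc f h acc' q rest' res hres ih1 ih2 =>
    have h' : ¬ PySem.Str.findFrom s p off = -1 := h
    have hX : find_quote_parts_alt_go (q :: rest') s
        (PySem.Str.findFrom s p off + PySem.Str.len p) [] = [] := by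
      rw [← ih1]; simpa using hres
    have hb := pvFindFrom_bounds s.toList p.toList off (by simpa using h')
    have hf0 : (0:Int) ≤ PySem.Str.findFrom s p off := by
      rw [PySem.Str.findFrom_eq]; exact hb.2.1
    have hlen0 : (0:Int) ≤ PySem.Str.len p := by
      rw [PySem.Str.len_eq]; exact Int.natCast_nonneg _
    have hRHS : find_quote_parts_alt_go (p :: q :: rest') s off acc = [] := by
      rw [show find_quote_parts_alt_go (p :: q :: rest') s off acc =
            if PySem.Str.findFrom s p off = -1 then []
            else find_quote_parts_alt_go (q :: rest') s
              (PySem.Str.findFrom s p off + PySem.Str.len p)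
              (acc ++ [PySem.Str.findFrom s p off]) from rfl]
      rw [if_neg h', pvAltGo_acc _ _ _ _ (List.cons_ne_nil _ _), if_pos hX]
    rw [hRHS, ih2]
    by_cases h2 : PySem.Str.findFrom s p (PySem.Str.findFrom s p off + 1) = -1
    · rw [show find_quote_parts_alt_go (p :: q :: rest') s (PySem.Str.findFrom s p off + 1) acc' =
            if PySem.Str.findFrom s p (PySem.Str.findFrom s p off + 1) = -1 then []
            else find_quote_parts_alt_go (q :: rest') s
              (PySem.Str.findFrom s p (PySem.Str.findFrom s p off + 1) + PySem.Str.len p)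
              (acc' ++ [PySem.Str.findFrom s p (PySem.Str.findFrom s p off + 1)]) from rfl]
      rw [if_pos h2]
    · have hb2 := pvFindFrom_bounds s.toList p.toList
        (PySem.Str.findFrom s p off + 1) (by simpa using h2)
      have h2ge : PySem.Str.findFrom s p off + 1 ≤
          PySem.Str.findFrom s p (PySem.Str.findFrom s p off + 1) := by
        rw [PySem.Str.findFrom_eq]
        simpa [PySem.Str.findFrom_eq] using hb2.1
      have hX2 : find_quote_parts_alt_go (q :: rest') s
          (PySem.Str.findFrom s p (PySem.Str.findFrom s p off + 1) + PySem.Str.len p) [] = [] := by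
        refine pvAltGo_mono _ _ _ _ (by omega) (by omega) hX
      rw [show find_quote_parts_alt_go (p :: q :: rest') s (PySem.Str.findFrom s p off + 1) acc' =
            if PySem.Str.findFrom s p (PySem.Str.findFrom s p off + 1) = -1 then []
            else find_quote_parts_alt_go (q :: rest') s
              (PySem.Str.findFrom s p (PySem.Str.findFrom s p off + 1) + PySem.Str.len p)
              (acc' ++ [PySem.Str.findFrom s p (PySem.Str.findFrom s p off + 1)]) from rfl]
      rw [if_neg h2, pvAltGo_acc _ _ _ _ (List.cons_ne_nil _ _), if_pos hX2]

-- ===== VERDICT (by name: the statement is the Claim_ definition above) =====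
theorem find_quote_parts_spec : Claim_equal_find_quote_parts := by
  intro tp s off _
  unfold Spec_find_quote_parts find_quote_parts find_quote_parts_alt
  cases tp with
  | nil => rfl
  | cons p rest => exact pvGo_eq p rest s off []
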